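-- pv_equiv track=rewrite | github.com/kimhj5379/Adder_Subtractor_Simulation | 4-bit_adder_sort.py | fill_outputs
-- ===== SOURCE A (Python) =====
-- desired_header = ['A0','A1','A2','A3','B0','B1','B2','B3','M','S0','S1','S2','S3','Cout']
--
-- def fill_outputs(row):
--     try:
--         A_bits = [int(row[desired_header.index(f'A{i}')]) for i in range(4)]
--         B_bits = [int(row[desired_header.index(f'B{i}')]) for i in range(4)]
--         Cin = int(row[desired_header.index('M')])
--     except Exception:
--         return row
--
--     A_val = sum(bit << i for i, bit in enumerate(A_bits))
--     B_val = sum(bit << i for i, bit in enumerate(B_bits))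
--     total = A_val + B_val + Cin
--
--     Cout_val = (total >> 4) & 1
--     S_vals = [(total >> i) & 1 for i in range(4)]
--
--     row[desired_header.index('Cout')] = str(Cout_val)
--     for i in range(4):
--         row[desired_header.index(f'S{i}')] = str(S_vals[i])
--     return row
-- ===== SOURCE B (Python) =====
-- desired_header = ['A0','A1','A2','A3','B0','B1','B2','B3','M','S0','S1','S2','S3','Cout']
--
-- def fill_outputs(row):
--     # Gate-level ripple-carry adder: four chained full adders (XOR for the sum bit,
--     # majority function for the carry) instead of A's integer sum with shift/mask
--     # extraction; field positions are the constant header's fixed indices.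
--     try:
--         vals = [int(row[i]) for i in range(9)]
--     except Exception:
--         return row
--
--     carry = vals[8]
--     s_vals = []
--     for x, y in zip(vals[0:4], vals[4:8]):
--         s_vals.append(x ^ y ^ carry)
--         carry = (x & y) | (x & carry) | (y & carry)
--
--     row[13] = str(carry)
--     for i in range(4):
--         row[9 + i] = str(s_vals[i])
--     return row
-- ===== Notes on version B (the rewrite author's own statement) =====
-- stated objective: alternative
-- what changed: B replaces A's integer-sum core (weighted sum of the bits, then shift-and-mask extraction of the five output bits) by a gate-level ripple-carry adder - four chained full adders computing each sum bit as x ^ y ^ carry and the next carry as the majority (x & y) | (x & carry) | (y & carry) - and reads/writes the fields at the constant header's fixed positions instead of repeated desired_header.index scans.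
import Mathlib
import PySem

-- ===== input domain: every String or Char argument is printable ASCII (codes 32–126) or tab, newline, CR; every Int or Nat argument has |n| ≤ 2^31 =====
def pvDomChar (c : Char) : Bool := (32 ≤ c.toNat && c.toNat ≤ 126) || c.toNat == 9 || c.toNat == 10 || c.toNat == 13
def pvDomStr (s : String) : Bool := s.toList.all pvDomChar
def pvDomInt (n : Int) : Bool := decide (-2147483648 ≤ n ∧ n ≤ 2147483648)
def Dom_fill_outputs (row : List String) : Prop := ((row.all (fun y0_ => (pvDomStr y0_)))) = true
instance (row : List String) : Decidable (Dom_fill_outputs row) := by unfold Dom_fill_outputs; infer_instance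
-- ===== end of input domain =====

-- B replaces A's integer-sum-and-mask core by a gate-level ripple-carry adder (XOR sum
-- bits, majority carries) and the header.index lookups by the constant header's fixed
-- positions (alternative algorithm, same cost). Both A and B mutate `row` in place in
-- Python; the ports are about the returned list.

-- ===== PORT A =====
def desiredHeader : List String :=
  ["A0","A1","A2","A3","B0","B1","B2","B3","M","S0","S1","S2","S3","Cout"]

-- int(row[desired_header.index(name)]); none = any exception (ValueError/IndexError)
def pvParseA (row : List String) (name : String) : Option Int :=
  match PySem.List.index? desiredHeader name with
  | none => none
  | some j => (PySem.List.pyGet? row j).bind PySem.Int.ofStr?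

-- [int(row[desired_header.index(f'{p}{i}')]) for i in range(4)]
def pvParseBits (row : List String) (p : String) : Option (List Int) :=
  (PySem.List.pyRange 0 4 1).foldr
    (fun i acc =>
      match pvParseA row (p ++ PySem.Int.toStr i), acc with
      | some v, some l => some (v :: l)
      | _, _ => none)
    (some [])

def fill_outputs (row : List String) : List String :=
  match pvParseBits row "A", pvParseBits row "B", pvParseA row "M" with
  | some aBits, some bBits, some cin =>
    -- sum(bit << i for i, bit in enumerate(...)); the index i is 0..3, so .toNat is exact
    let aVal := ((PySem.List.enumerate aBits).map (fun p => p.2 <<< p.1.toNat)).sum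
    let bVal := ((PySem.List.enumerate bBits).map (fun p => p.2 <<< p.1.toNat)).sum
    let total := aVal + bVal + cin
    let coutVal := PySem.Int.band (total >>> (4:Nat)) 1
    -- [(total >> i) & 1 for i in range(4)]; i is 0..3, so .toNat is exact
    let sVals := (PySem.List.pyRange 0 4 1).map (fun i => PySem.Int.band (total >>> i.toNat) 1)
    -- desired_header.index('Cout')/… always succeed on the constant header, so getD 0 is exact;
    -- the assignments need the index in range: Pre_ guarantees 14 ≤ row.length here
    let row1 := PySem.List.pySetD row ((PySem.List.index? desiredHeader "Cout").getD 0)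
                  (PySem.Int.toStr coutVal)
    (PySem.List.pyRange 0 4 1).foldl
      (fun r i => PySem.List.pySetD r
          ((PySem.List.index? desiredHeader ("S" ++ PySem.Int.toStr i)).getD 0)
          (PySem.Int.toStr (PySem.List.pyGetD sVals i 0)))
      row1
  | _, _, _ => row

-- ===== PORT B =====
-- [int(row[i]) for i in range(9)]
def pvParseVals (row : List String) : Option (List Int) :=
  (PySem.List.pyRange 0 9 1).foldr
    (fun i acc =>
      match (PySem.List.pyGet? row i).bind PySem.Int.ofStr?, acc with
      | some v, some l => some (v :: l)
      | _, _ => none)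
    (some [])

def fill_outputs_alt (row : List String) : List String :=
  match pvParseVals row with
  | none => row
  | some vals =>
    -- ripple-carry chain over zip(vals[0:4], vals[4:8]) with carry initialised to vals[8]:
    -- s_vals.append(x ^ y ^ carry); carry = (x & y) | (x & carry) | (y & carry)
    let st := ((PySem.List.slice vals (some 0) (some 4)).zip
               (PySem.List.slice vals (some 4) (some 8))).foldl
      (fun (st : List Int × Int) p =>
        (st.1 ++ [PySem.Int.bxor (PySem.Int.bxor p.1 p.2) st.2],
         PySem.Int.bor (PySem.Int.bor (PySem.Int.band p.1 p.2) (PySem.Int.band p.1 st.2))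
           (PySem.Int.band p.2 st.2)))
      ([], PySem.List.pyGetD vals 8 0)
    let row1 := PySem.List.pySetD row 13 (PySem.Int.toStr st.2)
    (PySem.List.pyRange 0 4 1).foldl
      (fun r i => PySem.List.pySetD r (9 + i) (PySem.Int.toStr (PySem.List.pyGetD st.1 i 0)))
      row1

-- ===== PRECONDITION & SPEC =====
-- the nine input positions A0..A3,B0..B3,M of the constant header
def pvIdx9 : List Int := [0,1,2,3,4,5,6,7,8]

-- int(row[j]) for position j
def pvParsed (row : List String) (j : Int) : Option Int :=
  (PySem.List.pyGet? row j).bind PySem.Int.ofStr?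

-- Pre_ excludes (a) rows whose nine input fields all parse as ints but whose length is
-- < 14, on which Python A raises IndexError at the write-back row[...] = … (outside the
-- try), and (b) rows whose nine fields all parse as ints but include a value other than
-- 0 or 1: on such malformed adder rows A's integer-masking result and B's gate-level
-- result are both accidental and neither is the specified one.
def Pre_fill_outputs (row : List String) : Prop :=
  (pvIdx9.all fun j => (pvParsed row j).isSome) = true →
    (14 ≤ row.length ∧
     (pvIdx9.all fun j =>
        ((pvParsed row j).getD 0 == 0 || (pvParsed row j).getD 0 == 1)) = true)
instance (row : List String) : Decidable (Pre_fill_outputs row) := by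
  unfold Pre_fill_outputs; infer_instance

def pvWitness_fill_outputs : List String :=
  ["1","0","1","0","0","1","1","0","1","x","x","x","x","x"]

def Spec_fill_outputs (row : List String) (out : List String) : Prop := out = fill_outputs_alt row
instance (row : List String) (out : List String) : Decidable (Spec_fill_outputs row out) := by
  unfold Spec_fill_outputs; infer_instance

-- ===== CLAIM (what is proved, stated in full; the proofs are below) =====
def Claim_equal_fill_outputs : Prop :=
  ∀ (row : List String), Dom_fill_outputs row → Pre_fill_outputs row →
    Spec_fill_outputs row (fill_outputs row)

-- ===== LEMMAS AND PROOFS =====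

theorem pvRange4 : PySem.List.pyRange 0 4 1 = [0,1,2,3] := by decide
theorem pvRange9 : PySem.List.pyRange 0 9 1 = [0,1,2,3,4,5,6,7,8] := by decide
theorem idxA0 : PySem.List.index? desiredHeader ("A" ++ PySem.Int.toStr 0) = some 0 := by decide
theorem idxA1 : PySem.List.index? desiredHeader ("A" ++ PySem.Int.toStr 1) = some 1 := by decide
theorem idxA2 : PySem.List.index? desiredHeader ("A" ++ PySem.Int.toStr 2) = some 2 := by decide
theorem idxA3 : PySem.List.index? desiredHeader ("A" ++ PySem.Int.toStr 3) = some 3 := by decide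
theorem idxB0 : PySem.List.index? desiredHeader ("B" ++ PySem.Int.toStr 0) = some 4 := by decide
theorem idxB1 : PySem.List.index? desiredHeader ("B" ++ PySem.Int.toStr 1) = some 5 := by decide
theorem idxB2 : PySem.List.index? desiredHeader ("B" ++ PySem.Int.toStr 2) = some 6 := by decide
theorem idxB3 : PySem.List.index? desiredHeader ("B" ++ PySem.Int.toStr 3) = some 7 := by decide
theorem idxM : PySem.List.index? desiredHeader "M" = some 8 := by decide
theorem idxCout : PySem.List.index? desiredHeader "Cout" = some 13 := by decide

set_option maxHeartbeats 4000000 in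
theorem fill_outputs_spec : Claim_equal_fill_outputs := by
  intro row _ hpre
  show fill_outputs row = fill_outputs_alt row
  simp only [fill_outputs, fill_outputs_alt, pvParseBits, pvParseVals, pvParseA,
    pvRange4, pvRange9, List.foldr,
    idxA0, idxA1, idxA2, idxA3, idxB0, idxB1, idxB2, idxB3, idxM, idxCout]
  simp only [Nat.cast_ofNat, Nat.cast_zero, Nat.cast_one, Option.getD_some]
  cases h0 : (PySem.List.pyGet? row 0).bind PySem.Int.ofStr? with
  | none => rfl
  | some v0 =>
  cases h1 : (PySem.List.pyGet? row 1).bind PySem.Int.ofStr? with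
  | none => rfl
  | some v1 =>
  cases h2 : (PySem.List.pyGet? row 2).bind PySem.Int.ofStr? with
  | none => rfl
  | some v2 =>
  cases h3 : (PySem.List.pyGet? row 3).bind PySem.Int.ofStr? with
  | none => rfl
  | some v3 =>
  cases h4 : (PySem.List.pyGet? row 4).bind PySem.Int.ofStr? with
  | none => rfl
  | some v4 =>
  cases h5 : (PySem.List.pyGet? row 5).bind PySem.Int.ofStr? with
  | none => rfl
  | some v5 =>
  cases h6 : (PySem.List.pyGet? row 6).bind PySem.Int.ofStr? with
  | none => rfl
  | some v6 =>
  cases h7 : (PySem.List.pyGet? row 7).bind PySem.Int.ofStr? with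
  | none => rfl
  | some v7 =>
  cases h8 : (PySem.List.pyGet? row 8).bind PySem.Int.ofStr? with
  | none => rfl
  | some v8 =>
  have hall : (pvIdx9.all fun j => (pvParsed row j).isSome) = true := by
    simp only [pvIdx9, pvParsed, List.all_cons, List.all_nil,
      h0, h1, h2, h3, h4, h5, h6, h7, h8, Option.isSome_some, Bool.and_self]
  have hbits := (hpre hall).2
  simp only [pvIdx9, pvParsed, List.all_cons, List.all_nil,
    h0, h1, h2, h3, h4, h5, h6, h7, h8, Option.getD_some, Bool.and_eq_true,
    Bool.or_eq_true, beq_iff_eq, and_true] at hbits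
  obtain ⟨hb0, hb1, hb2, hb3, hb4, hb5, hb6, hb7, hb8⟩ := hbits
  rcases hb0 with rfl | rfl <;> rcases hb1 with rfl | rfl <;>
    rcases hb2 with rfl | rfl <;> rcases hb3 with rfl | rfl <;>
    rcases hb4 with rfl | rfl <;> rcases hb5 with rfl | rfl <;>
    rcases hb6 with rfl | rfl <;> rcases hb7 with rfl | rfl <;>
    rcases hb8 with rfl | rfl <;> rfl

-- ===== VERDICT (by name: the statement is the Claim_ definition above) =====
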